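-- pv_equiv track=rewrite | github.com/robsdedude/melody-composer | util.py | index_of_vector_in_cartesian_power_set
-- ===== SOURCE A (Python) =====
-- def index_of_vector_in_cartesian_power_set(set_, vector):
--     len_x = len(set_)
--     len_v = len(vector)
--     index = 0
--     for idx in range(len_v - 1, -1, -1):
--         idx_inv = len_v - idx
--         value = len_x ** (idx_inv - 1)
--         index += (set_.index(vector[idx]) + 1) * value
--     return index - 1
-- ===== SOURCE B (Python) =====
-- def index_of_vector_in_cartesian_power_set(set_, vector):
--     first = {}
--     for i, v in enumerate(set_):
--         if v not in first:
--             first[v] = i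
--     n = len(set_)
--     acc = 0
--     for v in vector:
--         acc = acc * n + first[v] + 1
--     return acc - 1
-- ===== Notes on version B (the rewrite author's own statement) =====
-- stated objective: faster
-- what changed: Replaces the reverse loop that calls set_.index and recomputes len_x**k for every position with a value-to-first-index dict built once plus a single left-to-right Horner accumulation (acc = acc*n + rank + 1).
import Mathlib
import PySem

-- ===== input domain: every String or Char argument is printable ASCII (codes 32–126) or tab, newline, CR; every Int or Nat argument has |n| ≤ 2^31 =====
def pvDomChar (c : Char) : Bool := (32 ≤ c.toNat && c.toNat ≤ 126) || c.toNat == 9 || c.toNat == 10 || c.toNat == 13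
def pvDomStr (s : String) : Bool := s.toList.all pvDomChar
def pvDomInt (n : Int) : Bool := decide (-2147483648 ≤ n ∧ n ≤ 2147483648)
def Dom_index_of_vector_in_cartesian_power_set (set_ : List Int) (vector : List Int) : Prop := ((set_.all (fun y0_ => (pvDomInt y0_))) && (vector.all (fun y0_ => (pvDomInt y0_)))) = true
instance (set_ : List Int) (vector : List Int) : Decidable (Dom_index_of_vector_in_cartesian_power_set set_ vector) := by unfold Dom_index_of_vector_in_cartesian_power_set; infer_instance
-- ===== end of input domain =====

-- B replaces A's reverse loop (list.index + a fresh power per position) with a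
-- value->first-index dict built once and a single Horner pass; faster in a timing run.


-- ===== PORT A =====
-- Transliteration of A: countdown range, set_.index(vector[idx]) (its ValueError is
-- excluded by Pre_, so the .getD 0 default is never reached there), len_x ** (idx_inv - 1)
-- (the exponent is ≥ 0 for every idx the range produces, so .toNat is exact).
def index_of_vector_in_cartesian_power_set (set_ : List Int) (vector : List Int) : Int :=
  let len_x : Int := set_.length
  let len_v : Int := vector.length
  let index :=
    (PySem.List.pyRange (len_v - 1) (-1) (-1)).foldl
      (fun index idx =>
        let idx_inv := len_v - idx
        let value := len_x ^ (idx_inv - 1).toNat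
        index + (((PySem.List.index? set_ (PySem.List.pyGetD vector idx 0)).getD 0 : Int) + 1) * value)
      0
  index - 1

-- ===== PORT B =====
-- Transliteration of Source B: build value→first-index dict over enumerate(set_), then one
-- Horner pass over vector (first[v] with Pre_ guaranteeing the key is present).
def index_of_vector_in_cartesian_power_set_alt (set_ : List Int) (vector : List Int) : Int :=
  let first : PySem.Dict Int Int :=
    (PySem.List.enumerate set_).foldl
      (fun d iv => if d.contains iv.2 then d else d.insert iv.2 iv.1)
      PySem.Dict.empty
  let n : Int := set_.length
  let acc := vector.foldl (fun acc v => acc * n + first.getD v 0 + 1) 0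
  acc - 1

-- ===== PRECONDITION & SPEC =====
-- A raises ValueError (set_.index) exactly when some element of vector is not in set_;
-- B raises KeyError there. Pre_ excludes exactly those inputs.
def Pre_index_of_vector_in_cartesian_power_set (set_ : List Int) (vector : List Int) : Prop :=
  ∀ v ∈ vector, v ∈ set_
instance (set_ : List Int) (vector : List Int) : Decidable (Pre_index_of_vector_in_cartesian_power_set set_ vector) := by unfold Pre_index_of_vector_in_cartesian_power_set; infer_instance

def pvWitness_index_of_vector_in_cartesian_power_set : List Int × List Int := ([2, 5, 7], [7, 2, 2, 5])

def Spec_index_of_vector_in_cartesian_power_set (set_ : List Int) (vector : List Int) (out : Int) : Prop := out = index_of_vector_in_cartesian_power_set_alt set_ vector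
instance (set_ : List Int) (vector : List Int) (out : Int) : Decidable (Spec_index_of_vector_in_cartesian_power_set set_ vector out) := by unfold Spec_index_of_vector_in_cartesian_power_set; infer_instance

-- ===== CLAIM (what is proved, stated in full; the proofs are below) =====
def Claim_equal_index_of_vector_in_cartesian_power_set : Prop := ∀ (set_ : List Int) (vector : List Int), Dom_index_of_vector_in_cartesian_power_set set_ vector → Pre_index_of_vector_in_cartesian_power_set set_ vector → Spec_index_of_vector_in_cartesian_power_set set_ vector (index_of_vector_in_cartesian_power_set set_ vector)

-- ===== LEMMAS AND PROOFS =====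

-- The dict-building fold, characterised: lookups in the built dict are first-index lookups.
theorem get?_buildFirst (l : List Int) (s : Int) (d : PySem.Dict Int Int) (x : Int) :
    ((PySem.List.enumerate l s).foldl
        (fun d iv => if d.contains iv.2 then d else d.insert iv.2 iv.1) d).get? x =
      if d.contains x then d.get? x
      else (PySem.List.index? l x).map (fun k => s + (k : Int)) := by
  induction l generalizing s d with
  | nil =>
    rw [PySem.List.enumerate_nil, List.foldl_nil]
    by_cases h : d.contains x = true
    · rw [if_pos h]
    · have h' : d.contains x = false := by simpa using h
      have hidx : PySem.List.index? ([] : List Int) x = none := rfl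
      rw [if_neg h, hidx, (PySem.Dict.get?_eq_none_iff_contains d x).mpr h']
      rfl
  | cons y t ih =>
    rw [PySem.List.enumerate_cons, List.foldl_cons, ih]
    by_cases hdx : d.contains x = true
    · by_cases hyx : y = x
      · subst hyx
        simp [hdx]
      · have hstep : (if d.contains y = true then d else d.insert y s).contains x = true := by
          split
          · exact hdx
          · rw [PySem.Dict.contains_insert]; simp [hdx]
        have hget : (if d.contains y = true then d else d.insert y s).get? x = d.get? x := by
          split
          · rfl
          · exact PySem.Dict.get?_insert_of_ne d s (Ne.symm hyx)
        rw [if_pos hstep, hget, if_pos hdx]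
    · have hdx' : d.contains x = false := by simpa using hdx
      by_cases hyx : y = x
      · subst hyx
        rw [if_neg hdx]
        rw [PySem.Dict.contains_insert_self, if_pos rfl, PySem.Dict.get?_insert_self,
          if_neg hdx, PySem.List.index?_cons_self]
        simp
      · have hxy : x ≠ y := fun h => hyx h.symm
        have hc : (if d.contains y = true then d else d.insert y s).contains x = false := by
          split
          · exact hdx'
          · rw [PySem.Dict.contains_insert]; simp [hdx', hxy]
        rw [if_neg (by simp [hc]), if_neg hdx, PySem.List.index?_cons_of_ne t hyx]
        cases h : PySem.List.index? t x with
        | none => rfl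
        | some k => simp; ring

-- For members of set_, B's dict lookup is A's set_.index.
theorem getD_buildFirst_mem (set_ : List Int) (x : Int) (hx : x ∈ set_) :
    ((PySem.List.enumerate set_).foldl
        (fun d iv => if d.contains iv.2 then d else d.insert iv.2 iv.1)
        PySem.Dict.empty).getD x 0 =
      ((PySem.List.index? set_ x).getD 0 : Int) := by
  rw [PySem.Dict.getD_eq_get?_getD, get?_buildFirst]
  have hs : (PySem.List.index? set_ x).isSome := (PySem.List.index?_isSome_iff set_ x).mpr hx
  cases h : PySem.List.index? set_ x with
  | none => rw [h] at hs; simp at hs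
  | some k => simp [PySem.Dict.contains_empty]

-- Horner generalisation: the B-fold from an arbitrary accumulator.
theorem horner_gen (n : Int) (g : Int → Int) (vs : List Int) (acc : Int) :
    vs.foldl (fun a v => a * n + g v + 1) acc =
      acc * n ^ vs.length + vs.foldl (fun a v => a * n + g v + 1) 0 := by
  induction vs generalizing acc with
  | nil => simp
  | cons v t ih =>
    simp only [List.foldl_cons, List.length_cons]
    rw [ih (acc * n + g v + 1), ih (0 * n + g v + 1)]
    ring

-- The positional power sum equals the Horner fold.
theorem sum_pow_eq_horner (n : Int) (g : Int → Int) (vs : List Int) :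
    ((List.range vs.length).map
        (fun k => (g (vs.getD k 0) + 1) * n ^ (vs.length - 1 - k))).sum =
      vs.foldl (fun a v => a * n + g v + 1) 0 := by
  induction vs with
  | nil => simp
  | cons v t ih =>
    rw [List.length_cons, List.range_succ_eq_map, List.map_cons, List.map_map, List.sum_cons]
    have hmap : ∀ k ∈ List.range t.length,
        ((fun k => (g ((v :: t).getD k 0) + 1) * n ^ (t.length + 1 - 1 - k)) ∘ Nat.succ) k
          = (fun k => (g (t.getD k 0) + 1) * n ^ (t.length - 1 - k)) k := by
      intro k hk
      have he : t.length + 1 - 1 - (k + 1) = t.length - 1 - k := by omega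
      show (g ((v :: t).getD (k + 1) 0) + 1) * n ^ (t.length + 1 - 1 - (k + 1))
          = (g (t.getD k 0) + 1) * n ^ (t.length - 1 - k)
      rw [List.getD_cons_succ, he]
    rw [List.map_congr_left hmap, ih, List.foldl_cons,
      horner_gen n g t (0 * n + g v + 1)]
    simp only [List.getD_cons_zero, Nat.add_sub_cancel, Nat.sub_zero]
    ring

-- A's fold, characterised as the positional power sum.
theorem portA_eq_sum (set_ : List Int) (vector : List Int) :
    index_of_vector_in_cartesian_power_set set_ vector =
      ((List.range vector.length).map
        (fun k => (((PySem.List.index? set_ (vector.getD k 0)).getD 0 : Int) + 1)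
            * (set_.length : Int) ^ (vector.length - 1 - k))).sum - 1 := by
  unfold index_of_vector_in_cartesian_power_set
  dsimp only
  rw [PySem.List.foldl_add, PySem.List.pyRange_neg_one_eq_reverse]
  have h0 : ((-1 : Int) + 1) = 0 := by ring
  have hv : ((vector.length : Int) - 1 + 1) = (vector.length : Int) := by ring
  rw [h0, hv, List.map_reverse, List.sum_reverse, PySem.List.pyRange_one, List.map_map,
    sub_zero, Int.toNat_natCast]
  rw [zero_add]
  congr 1
  refine congrArg List.sum (List.map_congr_left ?_)
  intro k hk
  have hk' : k < vector.length := List.mem_range.mp hk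
  simp only [Function.comp]
  rw [zero_add]
  have h1 : PySem.List.pyGetD vector ((k : Nat) : Int) 0 = vector.getD k 0 :=
    PySem.List.pyGetD_natCast vector k 0
  have h2 : ((vector.length : Int) - (k : Int) - 1).toNat = vector.length - 1 - k := by omega
  rw [h1, h2]

-- ===== VERDICT (by name: the statement is the Claim_ definition above) =====
theorem index_of_vector_in_cartesian_power_set_spec : Claim_equal_index_of_vector_in_cartesian_power_set := by
  intro set_ vector _ hpre
  unfold Spec_index_of_vector_in_cartesian_power_set
  rw [portA_eq_sum]
  unfold index_of_vector_in_cartesian_power_set_alt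
  dsimp only
  rw [← sum_pow_eq_horner]
  congr 1
  refine congrArg List.sum (List.map_congr_left ?_)
  intro k hk
  have hk' : k < vector.length := List.mem_range.mp hk
  have hmem : vector.getD k 0 ∈ vector := by
    rw [List.getD_eq_getElem vector 0 hk']; exact List.getElem_mem hk'
  rw [getD_buildFirst_mem set_ _ (hpre _ hmem)]
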